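-- pv_equiv track=rewrite | github.com/schlarpc/pyshiningrgb | src/pyshiningrgb/tools/merge_captures.py | merge_streams
-- ===== SOURCE A (Python) =====
-- def merge_streams(streams):
--     """Merge multiple stream captures into consensus view
--
--     Args:
--         streams: list of dicts {offset: byte_value}
--
--     Returns:
--         merged: dict {offset: byte_value or None}
--         conflicts: dict {offset: [list of different values]}
--     """
--     if not streams:
--         return {}, {}
--
--     # Find all offsets across all streams
--     all_offsets = set()
--     for stream in streams:
--         all_offsets.update(stream.keys())
--
--     merged: dict[int, int | None] = {}
--     conflicts: dict[int, list[int | None]] = {}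
--
--     for offset in sorted(all_offsets):
--         values = []
--         for stream in streams:
--             if offset in stream:
--                 values.append(stream[offset])
--             else:
--                 values.append(None)
--
--         # Check if all non-None values agree
--         non_none = [v for v in values if v is not None]
--
--         if not non_none:
--             # All streams missing this byte
--             merged[offset] = None
--         elif len(set(non_none)) == 1:
--             # All present values agree
--             merged[offset] = non_none[0]
--         else:
--             # Conflict: different values present
--             merged[offset] = None  # Mark as conflict
--             conflicts[offset] = values
--
--     return merged, conflicts
-- ===== SOURCE B (Python) =====
-- def merge_streams(streams):
--     """Merge multiple stream captures into consensus view (one-pass bucketing by offset)."""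
--     index = {}
--     for i, stream in enumerate(streams):
--         for offset, value in stream.items():
--             index.setdefault(offset, []).append((i, value))
--     merged = {}
--     conflicts = {}
--     n = len(streams)
--     for offset in sorted(index):
--         entries = index[offset]
--         if len({v for _, v in entries}) == 1:
--             merged[offset] = entries[0][1]
--         else:
--             merged[offset] = None
--             values = [None] * n
--             for i, v in entries:
--                 values[i] = v
--             conflicts[offset] = values
--     return merged, conflicts
-- ===== Notes on version B (the rewrite author's own statement) =====
-- stated objective: faster
-- what changed: Instead of scanning every stream for every offset, B makes one pass over all entries bucketing (stream_index, value) per offset, then decides consensus per offset from its bucket, rebuilding the full per-stream value list only for conflicting offsets.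
import Mathlib
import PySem

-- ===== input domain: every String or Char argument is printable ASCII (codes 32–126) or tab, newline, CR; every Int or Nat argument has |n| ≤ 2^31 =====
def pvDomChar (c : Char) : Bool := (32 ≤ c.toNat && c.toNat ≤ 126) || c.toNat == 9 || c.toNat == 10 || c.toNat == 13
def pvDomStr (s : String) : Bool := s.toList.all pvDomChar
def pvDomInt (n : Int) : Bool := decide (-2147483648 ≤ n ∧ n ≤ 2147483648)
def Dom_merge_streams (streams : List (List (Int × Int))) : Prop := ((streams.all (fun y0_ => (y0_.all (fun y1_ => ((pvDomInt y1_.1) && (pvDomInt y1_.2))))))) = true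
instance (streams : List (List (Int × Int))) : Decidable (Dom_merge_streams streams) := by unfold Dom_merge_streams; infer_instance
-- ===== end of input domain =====

-- B buckets (stream_index, value) per offset in ONE pass over all entries, instead of A's
-- scan of every stream for every offset; the full per-stream value list is rebuilt only for
-- conflicting offsets. Equivalence of the return values is proved on all inputs.

-- ===== PORT A =====
def merge_streams (streams : List (List (Int × Int))) : (List (Int × Option Int)) × (List (Int × List (Option Int))) :=
  if streams = [] then ([], []) else
  -- all_offsets = set(); for stream in streams: all_offsets.update(stream.keys())
  let all_offsets : PySem.Set Int :=
    streams.foldl (fun s stream => PySem.Set.update s (PySem.Dict.ofList stream).keys) PySem.Set.empty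
  let res :=
    (PySem.List.sorted all_offsets (fun x => x) false).foldl
      (fun (acc : PySem.Dict Int (Option Int) × PySem.Dict Int (List (Option Int))) offset =>
        let values : List (Option Int) :=
          streams.map (fun stream => (PySem.Dict.ofList stream).get? offset)
        let non_none : List Int := values.filterMap id
        if non_none = [] then
          (acc.1.insert offset none, acc.2)
        else if PySem.Set.len (PySem.Set.ofList non_none) = 1 then
          (acc.1.insert offset (some (PySem.List.pyGetD non_none 0 0)), acc.2)
        else
          (acc.1.insert offset none, acc.2.insert offset values))
      (PySem.Dict.empty, PySem.Dict.empty)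
  (res.1.items, res.2.items)

-- ===== PORT B =====
def merge_streams_alt (streams : List (List (Int × Int))) : (List (Int × Option Int)) × (List (Int × List (Option Int))) :=
  -- index = {}; for i, stream in enumerate(streams): for offset, value in stream.items(): index.setdefault(offset, []).append((i, value))
  let index : PySem.Dict Int (List (Int × Int)) :=
    (PySem.List.enumerate streams).foldl
      (fun d p =>
        (PySem.Dict.ofList p.2).items.foldl
          (fun d q => d.modify q.1 [] (fun l => l ++ [(p.1, q.2)])) d)
      PySem.Dict.empty
  let n := streams.length
  let res :=
    (PySem.List.sorted index.keys (fun x => x) false).foldl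
      (fun (acc : PySem.Dict Int (Option Int) × PySem.Dict Int (List (Option Int))) offset =>
        let entries : List (Int × Int) := index.getD offset []
        if PySem.Set.len (PySem.Set.ofList (entries.map (fun q => q.2))) = 1 then
          (acc.1.insert offset (some (PySem.List.pyGetD entries 0 (0, 0)).2), acc.2)
        else
          (acc.1.insert offset none,
           acc.2.insert offset
             (entries.foldl (fun vals q => PySem.List.pySetD vals q.1 (some q.2))
               (List.replicate n none))))
      (PySem.Dict.empty, PySem.Dict.empty)
  (res.1.items, res.2.items)

-- ===== PRECONDITION & SPEC =====
def Spec_merge_streams (streams : List (List (Int × Int))) (out : (List (Int × Option Int)) × (List (Int × List (Option Int)))) : Prop := out = merge_streams_alt streams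
instance (streams : List (List (Int × Int))) (out : (List (Int × Option Int)) × (List (Int × List (Option Int)))) : Decidable (Spec_merge_streams streams out) := by unfold Spec_merge_streams; infer_instance

-- ===== CLAIM (what is proved, stated in full; the proofs are below) =====
def Claim_equal_merge_streams : Prop := ∀ (streams : List (List (Int × Int))), Dom_merge_streams streams → Spec_merge_streams streams (merge_streams streams)

-- ===== LEMMAS AND PROOFS =====

lemma pv_keys_index : ∀ (streams : List (List (Int × Int))) (s0 : Int) (d : PySem.Dict Int (List (Int × Int))),
    ((PySem.List.enumerate streams s0).foldl
      (fun d p => (PySem.Dict.ofList p.2).items.foldl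
          (fun d q => d.modify q.1 [] (fun l => l ++ [(p.1, q.2)])) d) d).keys
    = streams.foldl (fun s stream => PySem.Set.update s (PySem.Dict.ofList stream).keys) d.keys := by
  intro streams
  induction streams with
  | nil => intro s0 d; simp [PySem.List.enumerate_nil]
  | cons st rest ih =>
    intro s0 d
    rw [PySem.List.enumerate_cons, List.foldl_cons, ih, List.foldl_cons,
        PySem.Dict.keys_foldl_modify_key _ Prod.fst [] (fun d q => (fun l => l ++ [(s0, q.2)]))]
    rfl

def pvEntriesAt (streams : List (List (Int × Int))) (s0 : Int) (off : Int) : List (Int × Int) :=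
  (PySem.List.enumerate streams s0).filterMap
    (fun p => ((PySem.Dict.ofList p.2).get? off).map (fun v => (p.1, v)))

lemma pv_filter_mk : ∀ (l : List (Int × Int)) (off : Int), (l.map Prod.fst).Nodup →
    l.filter (fun q => q.1 == off) = (PySem.Dict.get? ⟨l⟩ off).elim [] (fun v => [(off, v)]) := by
  intro l
  induction l with
  | nil => intro off h; simp [PySem.Dict.get?]
  | cons q rest ih =>
    intro off h
    simp only [List.map_cons, List.nodup_cons] at h
    rw [PySem.Dict.get?_mk_cons]
    by_cases he : q.1 = off
    · simp only [List.filter_cons, he, beq_self_eq_true]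
      have hnil : rest.filter (fun q => q.1 == off) = [] := by
        rw [List.filter_eq_nil_iff]
        intro a ha
        simp only [beq_iff_eq]
        intro hb
        exact h.1 (he ▸ hb ▸ List.mem_map_of_mem (f := Prod.fst) ha)
      rw [hnil]
      simp [← he]
    · have hne : (q.1 == off) = false := by simpa using he
      simp only [List.filter_cons, hne]
      simpa using ih off h.2

lemma pv_inner_getD (items : List (Int × Int)) (h : (items.map Prod.fst).Nodup)
    (d : PySem.Dict Int (List (Int × Int))) (i off : Int) :
    (items.foldl (fun d q => d.modify q.1 [] (fun l => l ++ [(i, q.2)])) d).getD off []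
    = d.getD off [] ++ ((PySem.Dict.get? ⟨items⟩ off).elim [] (fun v => [(i, v)])) := by
  have h1 : (items.foldl (fun d q => d.modify q.1 [] (fun l => l ++ [(i, q.2)])) d)
      = ((items.map (fun q => (q.1, (i, q.2)))).foldl (fun d p => d.modify p.1 [] (fun l => l ++ [p.2])) d) := by
    rw [List.foldl_map]
  rw [h1, PySem.Dict.getD_foldl_modify_append]
  congr 1
  rw [List.filter_map]
  have h2 : ((fun p => p.1 == off) ∘ (fun q : Int × Int => (q.1, (i, q.2)))) = (fun q => q.1 == off) := rfl
  rw [h2, pv_filter_mk items off h, List.map_map]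
  cases PySem.Dict.get? ⟨items⟩ off <;> simp

lemma pv_entries_cons (st : List (Int × Int)) (rest : List (List (Int × Int))) (s0 off : Int) :
    pvEntriesAt (st :: rest) s0 off
    = ((PySem.Dict.ofList st).get? off).elim [] (fun v => [(s0, v)]) ++ pvEntriesAt rest (s0 + 1) off := by
  cases h : (PySem.Dict.ofList st).get? off <;>
    simp [pvEntriesAt, PySem.List.enumerate_cons, h]

lemma pv_getD_index : ∀ (streams : List (List (Int × Int))) (s0 : Int) (d : PySem.Dict Int (List (Int × Int))) (off : Int),
    ((PySem.List.enumerate streams s0).foldl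
      (fun d p => (PySem.Dict.ofList p.2).items.foldl
          (fun d q => d.modify q.1 [] (fun l => l ++ [(p.1, q.2)])) d) d).getD off []
    = d.getD off [] ++ pvEntriesAt streams s0 off := by
  intro streams
  induction streams with
  | nil => intro s0 d off; simp [PySem.List.enumerate_nil, pvEntriesAt]
  | cons st rest ih =>
    intro s0 d off
    rw [PySem.List.enumerate_cons, List.foldl_cons, ih, pv_entries_cons]
    have hnd : ((PySem.Dict.ofList st).items.map Prod.fst).Nodup := PySem.Dict.nodup_keys_ofList st
    rw [pv_inner_getD _ hnd d s0 off]
    simp [List.append_assoc]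

lemma pv_map_snd_entries : ∀ (streams : List (List (Int × Int))) (s0 : Int) (off : Int),
    (pvEntriesAt streams s0 off).map (fun q => q.2)
    = (streams.map (fun stream => (PySem.Dict.ofList stream).get? off)).filterMap id := by
  intro streams
  induction streams with
  | nil => intro s0 off; simp [pvEntriesAt, PySem.List.enumerate_nil]
  | cons st rest ih =>
    intro s0 off
    rw [pv_entries_cons, List.map_append]
    cases h : (PySem.Dict.ofList st).get? off <;> simp [h, ih]

lemma pv_mem_fold_update : ∀ (streams : List (List (Int × Int))) (s : PySem.Set Int) (off : Int),
    off ∈ streams.foldl (fun s stream => PySem.Set.update s (PySem.Dict.ofList stream).keys) s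
    ↔ off ∈ s ∨ ∃ st ∈ streams, off ∈ (PySem.Dict.ofList st).keys := by
  intro streams
  induction streams with
  | nil => intro s off; simp
  | cons st rest ih =>
    intro s off
    rw [List.foldl_cons, ih, PySem.Set.mem_update]
    simp only [List.mem_cons]
    constructor
    · rintro ((h | h) | ⟨a, ha, hm⟩)
      · exact Or.inl h
      · exact Or.inr ⟨st, Or.inl rfl, h⟩
      · exact Or.inr ⟨a, Or.inr ha, hm⟩
    · rintro (h | ⟨a, rfl | ha, hm⟩)
      · exact Or.inl (Or.inl h)
      · exact Or.inl (Or.inr hm)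
      · exact Or.inr ⟨a, ha, hm⟩

lemma pv_set_mid (pre t : List (Option Int)) (x y : Option Int) :
    (pre ++ x :: t).set pre.length y = pre ++ y :: t := by
  induction pre with
  | nil => rfl
  | cons a l ih => simp [ih]

lemma pv_rebuild (off : Int) : ∀ (streams : List (List (Int × Int))) (pre post : List (Option Int)),
    (pvEntriesAt streams (pre.length : Int) off).foldl
        (fun vals q => PySem.List.pySetD vals q.1 (some q.2))
        (pre ++ List.replicate streams.length none ++ post)
    = pre ++ streams.map (fun stream => (PySem.Dict.ofList stream).get? off) ++ post := by
  intro streams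
  induction streams with
  | nil => intro pre post; simp [pvEntriesAt, PySem.List.enumerate_nil]
  | cons st rest ih =>
    intro pre post
    rw [pv_entries_cons]
    have hlen : ((pre.length : Int) + 1) = (((pre ++ [(none : Option Int)]).length : Int)) := by
      simp
    have hlen2 : ((pre.length : Int) + 1) = (((pre ++ [some 0]).length : Int)) := by
      simp
    cases h : (PySem.Dict.ofList st).get? off with
    | none =>
      have hacc : pre ++ List.replicate (st :: rest).length (none : Option Int) ++ post
          = (pre ++ [none]) ++ List.replicate rest.length none ++ post := by
        simp [List.replicate_succ]
      rw [hacc]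
      have := ih (pre ++ [none]) post
      simp only [Option.elim, List.nil_append, hlen, this, List.map_cons, h]
      simp
    | some v =>
      have hv : ((pre.length : Int) + 1) = (((pre ++ [some v]).length : Int)) := by simp
      simp only [Option.elim, List.cons_append, List.nil_append, List.foldl_cons]
      have hacc : pre ++ List.replicate (st :: rest).length (none : Option Int) ++ post
          = pre ++ none :: (List.replicate rest.length none ++ post) := by
        simp [List.replicate_succ]
      rw [hacc, PySem.List.pySetD_natCast, pv_set_mid]
      have hacc2 : pre ++ some v :: (List.replicate rest.length (none : Option Int) ++ post)
          = (pre ++ [some v]) ++ List.replicate rest.length none ++ post := by simp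
      rw [hacc2, hv, ih (pre ++ [some v]) post]
      simp [h]

-- ===== VERDICT (by name: the statement is the Claim_ definition above) =====
theorem merge_streams_spec : Claim_equal_merge_streams := by
  intro streams _
  unfold Spec_merge_streams
  by_cases hs : streams = []
  · subst hs; decide
  · simp only [merge_streams, merge_streams_alt, if_neg hs]
    have hkeys : ((PySem.List.enumerate streams).foldl
        (fun d p => (PySem.Dict.ofList p.2).items.foldl
          (fun d q => d.modify q.1 [] (fun l => l ++ [(p.1, q.2)])) d) PySem.Dict.empty).keys
        = streams.foldl (fun s stream => PySem.Set.update s (PySem.Dict.ofList stream).keys) PySem.Set.empty := by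
      simpa using pv_keys_index streams 0 PySem.Dict.empty
    rw [hkeys]
    refine congrArg (fun r : PySem.Dict Int (Option Int) × PySem.Dict Int (List (Option Int)) => (r.1.items, r.2.items)) ?_
    refine PySem.List.foldl_congr_mem _ _ _ _ ?_
    intro acc off hoff
    have hent : ((PySem.List.enumerate streams).foldl
        (fun d p => (PySem.Dict.ofList p.2).items.foldl
          (fun d q => d.modify q.1 [] (fun l => l ++ [(p.1, q.2)])) d) PySem.Dict.empty).getD off []
        = pvEntriesAt streams 0 off := by
      simpa using pv_getD_index streams 0 PySem.Dict.empty off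
    rw [hent, pv_map_snd_entries]
    have hmem : ∃ st ∈ streams, off ∈ (PySem.Dict.ofList st).keys := by
      have h1 := (PySem.List.mem_sorted _ _ _ off).mp hoff
      have h2 := (pv_mem_fold_update streams PySem.Set.empty off).mp h1
      simpa [PySem.Set.empty] using h2
    obtain ⟨st, hst, hk⟩ := hmem
    have hv : ∃ v, (PySem.Dict.ofList st).get? off = some v := by
      cases hg : (PySem.Dict.ofList st).get? off with
      | none =>
        rw [PySem.Dict.get?_eq_none_iff_not_mem_keys] at hg
        exact absurd hk hg
      | some v => exact ⟨v, rfl⟩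
    obtain ⟨v, hv⟩ := hv
    have hne : List.filterMap id (streams.map (fun stream => (PySem.Dict.ofList stream).get? off)) ≠ [] := by
      intro hnil
      have hmemv : v ∈ List.filterMap id (streams.map (fun stream => (PySem.Dict.ofList stream).get? off)) :=
        List.mem_filterMap.mpr ⟨some v, List.mem_map.mpr ⟨st, hst, hv⟩, rfl⟩
      rw [hnil] at hmemv
      exact absurd hmemv (List.not_mem_nil)
    rw [if_neg hne]
    have hsnd := pv_map_snd_entries streams 0 off
    by_cases hc : (PySem.Set.ofList (List.filterMap id (streams.map (fun stream => (PySem.Dict.ofList stream).get? off)))).len = 1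
    · rw [if_pos hc, if_pos hc]
      cases hE : pvEntriesAt streams 0 off with
      | nil => rw [hE] at hsnd; exact absurd hsnd.symm (by simpa using hne)
      | cons e es =>
        rw [hE] at hsnd
        rw [← hsnd]
        simp [PySem.List.pyGetD_zero_cons]
    · rw [if_neg hc, if_neg hc]
      have hrb := pv_rebuild off streams [] []
      simp only [List.length_nil, Nat.cast_zero, List.nil_append, List.append_nil] at hrb
      rw [hrb]
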